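-- pv_equiv track=rewrite | github.com/Kwan-Lab/aboharbdavoudian2025 | functionScripts/helperFunctions.py | find_middle_occurrences
-- ===== SOURCE A (Python) =====
-- from collections import defaultdict, Counter
--
-- def find_middle_occurrences(lst):
--
--     positions = defaultdict(list)
--     first_occurrences, middle_occurrences, last_occurrences, items = [], [], [], []
--
--     # Store the positions of each unique element
--     for idx, elem in enumerate(lst):
--         positions[elem].append(idx)
--
--     # Find the middle occurrence of each unique element
--     for elem, pos_list in positions.items():
--         middle_idx = len(pos_list) // 2
--         middle_occurrence = pos_list[middle_idx]
--         middle_occurrences.append(middle_occurrence)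
--         items.append(elem)
--
--     # Return the first and last elements as well
--     for item in items:
--         first_occurrences.append(positions[item][0])
--         last_occurrences.append(positions[item][-1])
--
--     position_dict = dict()
--     position_dict = {item: [first_occurrences[i], middle_occurrences[i], last_occurrences[i]] for i, item in enumerate(items)}
--
--     return position_dict
-- ===== SOURCE B (Python) =====
-- from collections import Counter
--
-- def find_middle_occurrences(lst):
--     counts = Counter(lst)
--     first, mid, last, running = {}, {}, {}, Counter()
--     for i, e in enumerate(lst):
--         if e not in first:
--             first[e] = i
--         if running[e] == counts[e] // 2:
--             mid[e] = i
--         running[e] += 1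
--         last[e] = i
--     return {e: [first[e], mid[e], last[e]] for e in first}
-- ===== Notes on version B (the rewrite author's own statement) =====
-- stated objective: simpler
-- what changed: A groups all positions of every element into per-element lists and then runs three more passes (middle pass, first/last pass, dict comprehension); B makes one Counter pass and one enumerate pass keeping only four scalars per element (first index, middle index recorded when the running occurrence count hits count//2, last index, running count), then assembles the result directly.
import Mathlib
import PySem

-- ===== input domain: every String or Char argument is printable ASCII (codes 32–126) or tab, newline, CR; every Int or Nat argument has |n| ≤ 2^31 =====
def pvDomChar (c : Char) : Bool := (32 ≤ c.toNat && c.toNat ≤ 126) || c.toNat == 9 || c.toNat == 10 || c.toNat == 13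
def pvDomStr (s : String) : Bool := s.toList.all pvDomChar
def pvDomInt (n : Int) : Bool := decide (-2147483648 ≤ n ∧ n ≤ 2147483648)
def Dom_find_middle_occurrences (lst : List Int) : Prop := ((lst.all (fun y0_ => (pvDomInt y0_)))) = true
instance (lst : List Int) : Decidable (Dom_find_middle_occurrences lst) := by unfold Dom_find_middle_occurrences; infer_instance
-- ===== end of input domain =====

-- B replaces A's per-element position lists and three assembly loops by a single pass keeping only
-- scalars (first/middle/last index and a running count) per element; objective: simpler.

-- ===== PORT A =====
-- positions = defaultdict(list); for idx, elem in enumerate(lst): positions[elem].append(idx)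
def A_positions (lst : List Int) : PySem.Dict Int (List Int) :=
  (PySem.List.enumerate lst 0).foldl
    (fun (d : PySem.Dict Int (List Int)) p => d.modify p.2 [] (· ++ [p.1])) PySem.Dict.empty

-- for elem, pos_list in positions.items(): middle_occurrences.append(pos_list[len(pos_list)//2]); items.append(elem)
-- (every pos_list is nonempty, so the 0 defaults of pyGetD in this port are never read: exact)
def A_mi (lst : List Int) : List Int × List Int :=
  (A_positions lst).items.foldl
    (fun (acc : List Int × List Int) it =>
      (acc.1 ++ [PySem.List.pyGetD it.2 (PySem.Int.floordiv ((it.2.length : Int)) 2) 0],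
       acc.2 ++ [it.1])) ([], [])

-- for item in items: first_occurrences.append(positions[item][0]); last_occurrences.append(positions[item][-1])
def A_fl (lst : List Int) : List Int × List Int :=
  (A_mi lst).2.foldl
    (fun (acc : List Int × List Int) item =>
      (acc.1 ++ [PySem.List.pyGetD ((A_positions lst).getD item []) 0 0],
       acc.2 ++ [PySem.List.pyGetD ((A_positions lst).getD item []) (-1) 0])) ([], [])

-- {item: [first_occurrences[i], middle_occurrences[i], last_occurrences[i]] for i, item in enumerate(items)}
def find_middle_occurrences (lst : List Int) : List (Int × List Int) :=
  ((PySem.List.enumerate (A_mi lst).2 0).foldl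
    (fun (d : PySem.Dict Int (List Int)) p =>
      d.insert p.2 [PySem.List.pyGetD (A_fl lst).1 p.1 0,
                    PySem.List.pyGetD (A_mi lst).1 p.1 0,
                    PySem.List.pyGetD (A_fl lst).2 p.1 0]) PySem.Dict.empty).items

-- ===== PORT B =====
-- loop body of Source B (state: first, mid, last, running; p = (i, e))
def find_mo_step (counts : PySem.Dict Int Int)
    (st : PySem.Dict Int Int × PySem.Dict Int Int × PySem.Dict Int Int × PySem.Dict Int Int)
    (p : Int × Int) :
    PySem.Dict Int Int × PySem.Dict Int Int × PySem.Dict Int Int × PySem.Dict Int Int :=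
  let first := if st.1.contains p.2 then st.1 else st.1.insert p.2 p.1
  let mid := if st.2.2.2.getD p.2 0 = PySem.Int.floordiv (counts.getD p.2 0) 2
             then st.2.1.insert p.2 p.1 else st.2.1
  let running := st.2.2.2.modify p.2 0 (· + 1)
  let last := st.2.2.1.insert p.2 p.1
  (first, mid, last, running)

-- counts = Counter(lst); for i, e in enumerate(lst): <find_mo_step>
def B_state (lst : List Int) :
    PySem.Dict Int Int × PySem.Dict Int Int × PySem.Dict Int Int × PySem.Dict Int Int :=
  (PySem.List.enumerate lst 0).foldl (find_mo_step (PySem.Dict.counter lst))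
    (PySem.Dict.empty, PySem.Dict.empty, PySem.Dict.empty, PySem.Dict.empty)

-- {e: [first[e], mid[e], last[e]] for e in first}  (every key of first is a key of mid and last: the 0 defaults are never read)
def find_middle_occurrences_alt (lst : List Int) : List (Int × List Int) :=
  ((B_state lst).1.keys.foldl
    (fun (d : PySem.Dict Int (List Int)) e =>
      d.insert e [(B_state lst).1.getD e 0, (B_state lst).2.1.getD e 0, (B_state lst).2.2.1.getD e 0])
    PySem.Dict.empty).items

-- ===== PRECONDITION & SPEC =====
def Spec_find_middle_occurrences (lst : List Int) (out : List (Int × List Int)) : Prop := out = find_middle_occurrences_alt lst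
instance (lst : List Int) (out : List (Int × List Int)) : Decidable (Spec_find_middle_occurrences lst out) := by unfold Spec_find_middle_occurrences; infer_instance

-- ===== CLAIM (what is proved, stated in full; the proofs are below) =====
def Claim_equal_find_middle_occurrences : Prop := ∀ (lst : List Int), Dom_find_middle_occurrences lst → Spec_find_middle_occurrences lst (find_middle_occurrences lst)

-- ===== LEMMAS AND PROOFS =====

-- the indices carried by the pairs of l whose element component is e
def occP (l : List (Int × Int)) (e : Int) : List Int :=
  (l.filter (fun p => p.2 == e)).map (·.1)

-- the list of indices at which e occurs in lst
def occ (lst : List Int) (e : Int) : List Int := occP (PySem.List.enumerate lst 0) e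

-- canonical common form of both results
def canon (lst : List Int) : List (Int × List Int) :=
  (PySem.List.dedup lst).map (fun e =>
    (e, [((occ lst e).head?).getD 0,
         (occ lst e).getD ((occ lst e).length / 2) 0,
         ((occ lst e).getLast?).getD 0]))

theorem occP_concat (l : List (Int × Int)) (p : Int × Int) (e : Int) :
    occP (l ++ [p]) e = occP l e ++ (if p.2 = e then [p.1] else []) := by
  by_cases h : p.2 = e <;> simp [occP, List.filter_append, h]

theorem occP_eq_nil_iff (l : List (Int × Int)) (e : Int) :
    occP l e = [] ↔ e ∉ l.map (·.2) := by
  simp only [occP, List.map_eq_nil_iff, List.filter_eq_nil_iff, beq_iff_eq, List.mem_map]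
  push Not
  tauto

theorem occP_enum_length (lst : List Int) (s e : Int) :
    (occP (PySem.List.enumerate lst s) e).length = lst.count e := by
  induction lst generalizing s with
  | nil => simp [occP]
  | cons x xs ih =>
    by_cases h : x = e <;>
      simp [occP, PySem.List.enumerate_cons, h, ← ih (s + 1)]

-- unconditional bridges between A's pyGetD accesses and canon's Option accesses
theorem pyGetD_zero_head (xs : List Int) (d : Int) :
    PySem.List.pyGetD xs 0 d = xs.head?.getD d := by
  cases xs <;> simp [PySem.List.pyGetD_zero]

theorem pyGetD_floordiv_half (xs : List Int) (d : Int) :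
    PySem.List.pyGetD xs (PySem.Int.floordiv ((xs.length : Int)) 2) d
      = xs.getD (xs.length / 2) d := by
  have h : PySem.Int.floordiv ((xs.length : Int)) 2 = ((xs.length / 2 : Nat) : Int) := by
    exact_mod_cast PySem.Int.floordiv_natCast xs.length 2
  rw [h, PySem.List.pyGetD_natCast]

theorem pyGetD_neg_one_last (xs : List Int) (d : Int) :
    PySem.List.pyGetD xs (-1) d = xs.getLast?.getD d := by
  induction xs using List.reverseRecOn with
  | nil => simp [PySem.List.pyGetD, PySem.List.pyGet?]
  | append_singleton ys y _ =>
    rw [PySem.List.pyGetD_neg_one_append_singleton, List.getLast?_concat]; rfl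

-- A's grouping dict: value lists and key order
theorem positions_getD (lst : List Int) (e : Int) :
    (A_positions lst).getD e [] = occ lst e := by
  have h : A_positions lst
      = (((PySem.List.enumerate lst 0).map Prod.swap).foldl
          (fun (d : PySem.Dict Int (List Int)) q => d.modify q.1 [] (· ++ [q.2]))
          PySem.Dict.empty) := by
    rw [List.foldl_map]; simp [A_positions, Prod.swap]
  rw [h, PySem.Dict.getD_foldl_modify_append]
  simp [occ, occP, List.filter_map, Function.comp_def, Prod.swap]

theorem positions_keys (lst : List Int) :
    (A_positions lst).keys = PySem.List.dedup lst := by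
  have h := PySem.Dict.keys_foldl_modify_key (PySem.List.enumerate lst 0)
      (fun p => p.2) ([] : List Int) (fun _ p => (· ++ [p.1])) PySem.Dict.empty
  simp only [A_positions, h, PySem.Dict.keys_empty, PySem.Set.update_nil_left,
    PySem.List.map_snd_enumerate, PySem.List.dedup_eq_ofList]

theorem positions_items (lst : List Int) :
    (A_positions lst).items
      = (PySem.List.dedup lst).map (fun e => (e, occ lst e)) := by
  rw [PySem.Dict.items_eq_map_keys (A_positions lst)
      (by rw [positions_keys]; simp [PySem.List.dedup_eq_ofList, PySem.Set.nodup_ofList]) []]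
  rw [positions_keys]
  simp only [positions_getD]

theorem A_mi_eq (lst : List Int) :
    A_mi lst = ((PySem.List.dedup lst).map
        (fun e => PySem.List.pyGetD (occ lst e)
          (PySem.Int.floordiv (((occ lst e).length : Int)) 2) 0),
      PySem.List.dedup lst) := by
  unfold A_mi
  have h := PySem.List.foldl_prod_mk
    (fun (x : List Int) (it : Int × List Int) =>
      x ++ [PySem.List.pyGetD it.2 (PySem.Int.floordiv ((it.2.length : Int)) 2) 0])
    (fun (x : List Int) (it : Int × List Int) => x ++ [it.1])
    (A_positions lst).items [] []
  refine h.trans ?_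
  rw [PySem.List.foldl_append_singleton_eq_map, PySem.List.foldl_append_singleton_eq_map,
    positions_items]
  simp [List.map_map, Function.comp_def]

theorem A_fl_eq (lst : List Int) :
    A_fl lst = ((PySem.List.dedup lst).map (fun e => PySem.List.pyGetD (occ lst e) 0 0),
      (PySem.List.dedup lst).map (fun e => PySem.List.pyGetD (occ lst e) (-1) 0)) := by
  unfold A_fl
  have h := PySem.List.foldl_prod_mk
    (fun (x : List Int) (item : Int) =>
      x ++ [PySem.List.pyGetD ((A_positions lst).getD item []) 0 0])
    (fun (x : List Int) (item : Int) =>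
      x ++ [PySem.List.pyGetD ((A_positions lst).getD item []) (-1) 0])
    (A_mi lst).2 [] []
  refine h.trans ?_
  rw [PySem.List.foldl_append_singleton_eq_map, PySem.List.foldl_append_singleton_eq_map,
    A_mi_eq]
  simp only [positions_getD]
  simp

-- the final dict comprehension over a duplicate-free key list, as a map
theorem assemble (dd : List Int) (hnd : dd.Nodup) (F M L : Int → Int) :
    ((PySem.List.enumerate dd 0).foldl
      (fun (d : PySem.Dict Int (List Int)) p =>
        d.insert p.2 [PySem.List.pyGetD (dd.map F) p.1 0,
                      PySem.List.pyGetD (dd.map M) p.1 0,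
                      PySem.List.pyGetD (dd.map L) p.1 0]) PySem.Dict.empty).items
    = dd.map (fun e => (e, [F e, M e, L e])) := by
  rw [PySem.Dict.items_foldl_insert_fresh (PySem.List.enumerate dd 0) (fun p => p.2)
    (fun p => [PySem.List.pyGetD (dd.map F) p.1 0, PySem.List.pyGetD (dd.map M) p.1 0,
               PySem.List.pyGetD (dd.map L) p.1 0]) PySem.Dict.empty
    (fun a _ => PySem.Dict.contains_empty _)
    (by rw [PySem.List.map_snd_enumerate]; exact hnd)]
  have hemp : (PySem.Dict.empty : PySem.Dict Int (List Int)).items = [] := rfl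
  rw [hemp]
  apply List.ext_getElem
  · simp
  · intro i h1 h2
    simp only [List.nil_append, List.getElem_map, PySem.List.getElem_enumerate]
    have hi : i < dd.length := by simpa using h2
    simp [PySem.List.pyGetD_natCast, List.getD_eq_getElem?_getD, List.getElem?_map,
      List.getElem?_eq_getElem hi]

theorem canon_A (lst : List Int) : find_middle_occurrences lst = canon lst := by
  unfold find_middle_occurrences canon
  rw [A_mi_eq, A_fl_eq]
  rw [assemble _ (by simp [PySem.List.dedup_eq_ofList, PySem.Set.nodup_ofList])]
  apply List.map_congr_left
  intro e _
  rw [pyGetD_zero_head, pyGetD_floordiv_half, pyGetD_neg_one_last]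

-- B's loop invariant: the four scalar dicts, characterised against the processed pair list
theorem B_inv (counts : PySem.Dict Int Int) (hc : ∀ e, 0 ≤ counts.getD e 0)
    (l : List (Int × Int)) :
    (∀ e, ((l.foldl (find_mo_step counts)
        (PySem.Dict.empty, PySem.Dict.empty, PySem.Dict.empty, PySem.Dict.empty)).1).get? e
        = (occP l e).head?)
  ∧ ((l.foldl (find_mo_step counts)
        (PySem.Dict.empty, PySem.Dict.empty, PySem.Dict.empty, PySem.Dict.empty)).1.keys
        = PySem.Set.ofList (l.map (·.2)))
  ∧ (∀ e, ((l.foldl (find_mo_step counts)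
        (PySem.Dict.empty, PySem.Dict.empty, PySem.Dict.empty, PySem.Dict.empty)).2.1).get? e
        = (occP l e)[((counts.getD e 0).toNat) / 2]?)
  ∧ (∀ e, ((l.foldl (find_mo_step counts)
        (PySem.Dict.empty, PySem.Dict.empty, PySem.Dict.empty, PySem.Dict.empty)).2.2.1).get? e
        = (occP l e).getLast?)
  ∧ (∀ e, ((l.foldl (find_mo_step counts)
        (PySem.Dict.empty, PySem.Dict.empty, PySem.Dict.empty, PySem.Dict.empty)).2.2.2).getD e 0
        = ((occP l e).length : Int)) := by
  induction l using List.reverseRecOn with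
  | nil =>
    refine ⟨fun e => ?_, ?_, fun e => ?_, fun e => ?_, fun e => ?_⟩ <;>
      simp [occP, PySem.Dict.get?_empty, PySem.Dict.getD_empty, PySem.Dict.keys_empty]
  | append_singleton l p ih =>
    obtain ⟨ih1, ih2, ih3, ih4, ih5⟩ := ih
    obtain ⟨i, a⟩ := p
    rw [List.foldl_append, List.foldl_cons, List.foldl_nil]
    generalize l.foldl (find_mo_step counts)
      (PySem.Dict.empty, PySem.Dict.empty, PySem.Dict.empty, PySem.Dict.empty) = s
      at ih1 ih2 ih3 ih4 ih5 ⊢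
    have hstep1 : (find_mo_step counts s (i, a)).1
        = if s.1.contains a then s.1 else s.1.insert a i := rfl
    have hstep2 : (find_mo_step counts s (i, a)).2.1
        = if s.2.2.2.getD a 0 = PySem.Int.floordiv (counts.getD a 0) 2
          then s.2.1.insert a i else s.2.1 := rfl
    have hstep3 : (find_mo_step counts s (i, a)).2.2.1 = s.2.2.1.insert a i := rfl
    have hstep4 : (find_mo_step counts s (i, a)).2.2.2 = s.2.2.2.modify a 0 (· + 1) := rfl
    have hocc : ∀ e, occP (l ++ [(i, a)]) e = occP l e ++ (if a = e then [i] else []) := by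
      intro e; exact occP_concat l (i, a) e
    have hmemocc : occP l a = [] ↔ a ∉ l.map (·.2) := occP_eq_nil_iff l a
    -- the running count before the step
    have hcnt : s.2.2.2.getD a 0 = ((occP l a).length : Int) := ih5 a
    have hcast : PySem.Int.floordiv (counts.getD a 0) 2
        = (((counts.getD a 0).toNat / 2 : Nat) : Int) := by
      have h0 : counts.getD a 0 = (((counts.getD a 0).toNat : Nat) : Int) :=
        (Int.toNat_of_nonneg (hc a)).symm
      rw [h0]; exact_mod_cast PySem.Int.floordiv_natCast (counts.getD a 0).toNat 2
    refine ⟨fun e => ?_, ?_, fun e => ?_, fun e => ?_, fun e => ?_⟩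
    -- first
    · rw [hstep1, hocc e]
      by_cases hea : e = a
      · subst hea
        rw [if_pos rfl]
        by_cases hct : s.1.contains e = true
        · have hmem : e ∈ l.map (·.2) := by
            have := (PySem.Dict.contains_iff_mem_keys s.1 e).mp hct
            rw [ih2] at this
            exact (PySem.Set.mem_ofList _ _).mp this
          have hne : occP l e ≠ [] := fun h => (hmemocc.mp h) hmem
          rw [if_pos hct, ih1 e]
          cases hoc : occP l e with
          | nil => exact absurd hoc hne
          | cons x xs => simp
        · have hnmem : occP l e = [] := by
            apply hmemocc.mpr
            intro hmem
            exact hct ((PySem.Dict.contains_iff_mem_keys s.1 e).mpr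
              (by rw [ih2]; exact (PySem.Set.mem_ofList _ _).mpr hmem))
          rw [if_neg hct, PySem.Dict.get?_insert_self, hnmem]
          simp
      · rw [if_neg (show ¬ a = e from fun h => hea h.symm), List.append_nil]
        by_cases hct : s.1.contains a = true
        · rw [if_pos hct]; exact ih1 e
        · rw [if_neg hct, PySem.Dict.get?_insert_of_ne _ _ hea]; exact ih1 e
    -- keys
    · have hmap : (l ++ [(i, a)]).map (·.2) = l.map (·.2) ++ [a] := by simp
      rw [hstep1, hmap, PySem.Set.ofList_append_singleton, ← ih2]
      by_cases hct : s.1.contains a = true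
      · have hmem : a ∈ s.1.keys := (PySem.Dict.contains_iff_mem_keys s.1 a).mp hct
        rw [if_pos hct, PySem.Set.add_of_mem hmem]
      · have hnm : a ∉ s.1.keys := fun h =>
          hct ((PySem.Dict.contains_iff_mem_keys s.1 a).mpr h)
        rw [if_neg hct,
          PySem.Dict.keys_insert_of_not_contains s.1 i (Bool.not_eq_true _ ▸ hct),
          PySem.Set.add_of_not_mem hnm]
    -- mid
    · rw [hstep2, hocc e]
      by_cases hea : e = a
      · subst hea
        rw [if_pos rfl]
        set k : Nat := (counts.getD e 0).toNat / 2 with hk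
        by_cases hnk : (occP l e).length = k
        · have hcond : s.2.2.2.getD e 0 = PySem.Int.floordiv (counts.getD e 0) 2 := by
            rw [hcnt, hcast]
            exact_mod_cast hnk
          rw [if_pos hcond, PySem.Dict.get?_insert_self, ← hnk, List.getElem?_concat_length]
        · have hcond : ¬ (s.2.2.2.getD e 0 = PySem.Int.floordiv (counts.getD e 0) 2) := by
            rw [hcnt, hcast]
            intro h
            exact hnk (by exact_mod_cast h)
          rw [if_neg hcond, ih3 e]
          rcases Nat.lt_or_ge k (occP l e).length with hlt | hge
          · rw [List.getElem?_append_left hlt]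
          · have hgt : (occP l e).length < k := by omega
            rw [List.getElem?_eq_none (by omega), List.getElem?_eq_none (by simp; omega)]
      · rw [if_neg (show ¬ a = e from fun h => hea h.symm), List.append_nil]
        by_cases hcond : s.2.2.2.getD a 0 = PySem.Int.floordiv (counts.getD a 0) 2
        · rw [if_pos hcond, PySem.Dict.get?_insert_of_ne _ _ hea]; exact ih3 e
        · rw [if_neg hcond]; exact ih3 e
    -- last
    · rw [hstep3, hocc e]
      by_cases hea : e = a
      · subst hea
        rw [if_pos rfl, PySem.Dict.get?_insert_self, List.getLast?_concat]
      · rw [if_neg (show ¬ a = e from fun h => hea h.symm), List.append_nil,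
          PySem.Dict.get?_insert_of_ne _ _ hea]
        exact ih4 e
    -- running
    · rw [hstep4, PySem.Dict.getD_modify, hocc e]
      by_cases hea : e = a
      · subst hea
        rw [if_pos rfl, if_pos rfl, ih5 e]
        simp
      · rw [if_neg hea, if_neg (show ¬ a = e from fun h => hea h.symm), List.append_nil]
        exact ih5 e

theorem canon_B (lst : List Int) : find_middle_occurrences_alt lst = canon lst := by
  obtain ⟨ih1, ih2, ih3, ih4, _⟩ := B_inv (PySem.Dict.counter lst)
    (fun e => by rw [PySem.Dict.getD_counter]; exact Int.natCast_nonneg _)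
    (PySem.List.enumerate lst 0)
  have hB : B_state lst = (PySem.List.enumerate lst 0).foldl
      (find_mo_step (PySem.Dict.counter lst))
      (PySem.Dict.empty, PySem.Dict.empty, PySem.Dict.empty, PySem.Dict.empty) := rfl
  have hkeys : (B_state lst).1.keys = PySem.List.dedup lst := by
    rw [hB, ih2, PySem.List.map_snd_enumerate, PySem.List.dedup_eq_ofList]
  have hnd : (B_state lst).1.keys.Nodup := by
    rw [hkeys]; simp [PySem.List.dedup_eq_ofList, PySem.Set.nodup_ofList]
  unfold find_middle_occurrences_alt
  rw [PySem.Dict.items_foldl_insert_fresh ((B_state lst).1.keys) (fun e => e)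
    (fun e => [(B_state lst).1.getD e 0, (B_state lst).2.1.getD e 0, (B_state lst).2.2.1.getD e 0])
    PySem.Dict.empty (fun a _ => PySem.Dict.contains_empty _) (by simpa using hnd)]
  have hemp : (PySem.Dict.empty : PySem.Dict Int (List Int)).items = [] := rfl
  rw [hemp, hkeys]
  simp only [List.nil_append]
  unfold canon
  apply List.map_congr_left
  intro e _
  have h1 : (B_state lst).1.getD e 0 = ((occ lst e).head?).getD 0 := by
    rw [PySem.Dict.getD_eq_get?_getD, hB, ih1 e]; rfl
  have h3 : (B_state lst).2.2.1.getD e 0 = ((occ lst e).getLast?).getD 0 := by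
    rw [PySem.Dict.getD_eq_get?_getD, hB, ih4 e]; rfl
  have h2 : (B_state lst).2.1.getD e 0 = (occ lst e).getD ((occ lst e).length / 2) 0 := by
    rw [PySem.Dict.getD_eq_get?_getD, hB, ih3 e]
    have hcount : ((PySem.Dict.counter lst).getD e 0).toNat = (occ lst e).length := by
      rw [PySem.Dict.getD_counter, Int.toNat_natCast, occ, occP_enum_length]
    rw [hcount, List.getD_eq_getElem?_getD]
    rfl
  rw [h1, h2, h3]

-- ===== VERDICT (by name: the statement is the Claim_ definition above) =====
theorem find_middle_occurrences_spec : Claim_equal_find_middle_occurrences := by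
  intro lst _
  unfold Spec_find_middle_occurrences
  rw [canon_A, canon_B]
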